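-- pv_equiv track=rewrite | github.com/SunnyHuangCodebase/Data-Structures-and-Algorithms | algorithms/strings.py | capitalize_words
-- ===== SOURCE A (Python) =====
-- def capitalize_words(string: str | None) -> str:
--   """Capitalizes first letter of a word and removes extra spaces.
--
--   Time Complexity: O(n)
--   Space Complexity: O(n)
--   """
--   if not string:
--     return ""
--
--   words: list[str] = []
--   current_word: list[str] = []
--
--   for char in string:
--
--     if char == " ":
--       if current_word:
--         words.append("".join(current_word))
--         current_word.clear()
--       continue
--
--     if current_word:
--       current_word.append(char.lower())
--     else:
--       current_word.append(char.upper())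
--
--   if current_word:
--     words.append("".join(current_word))
--
--   return " ".join(words)
-- ===== SOURCE B (Python) =====
-- def capitalize_words(string: str | None) -> str:
--   """Capitalizes first letter of a word and removes extra spaces."""
--   if not string:
--     return ""
--   return " ".join(w[0].upper() + w[1:].lower() for w in string.split(" ") if w)
-- ===== Notes on version B (the rewrite author's own statement) =====
-- stated objective: idiomatic
-- what changed: Replaces A's character-level state machine (explicit words/current_word accumulators with per-char flush logic) by a token-level one-liner: split on the space character, drop empty tokens, recase each token with w[0].upper()+w[1:].lower(), and join.
import Mathlib
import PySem

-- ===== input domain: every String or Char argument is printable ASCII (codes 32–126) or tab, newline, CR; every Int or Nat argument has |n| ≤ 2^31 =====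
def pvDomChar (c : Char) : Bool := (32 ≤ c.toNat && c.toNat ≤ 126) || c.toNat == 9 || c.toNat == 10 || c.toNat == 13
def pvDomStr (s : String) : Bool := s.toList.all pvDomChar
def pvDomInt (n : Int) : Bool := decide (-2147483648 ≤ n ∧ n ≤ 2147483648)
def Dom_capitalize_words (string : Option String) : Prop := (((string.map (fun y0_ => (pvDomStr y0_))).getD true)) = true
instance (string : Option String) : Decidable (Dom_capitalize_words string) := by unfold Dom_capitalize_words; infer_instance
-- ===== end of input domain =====

-- B replaces A's character-level state machine by an idiomatic split-on-space / filter / recase / join pipeline (measured faster in a timing run, constant factor).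


-- ===== PORT A =====
-- A's per-char loop body: on ' ' flush current_word (if nonempty); otherwise append
-- char.lower() when mid-word, char.upper() when starting a word.
def capA_step (st : List (List Char) × List Char) (c : Char) : List (List Char) × List Char :=
  if c = ' ' then
    if st.2 ≠ [] then (st.1 ++ [st.2], []) else st
  else if st.2 ≠ [] then (st.1, st.2 ++ [PySem.Chars.lowerChar c])
  else (st.1, st.2 ++ [PySem.Chars.upperChar c])

def capitalize_words (string : Option String) : String :=
  match string with
  | none => ""          -- `if not string: return ""`
  | some s =>
    if s = "" then ""   -- `if not string: return ""`
    else
      let st := s.toList.foldl capA_step ([], [])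
      let words := if st.2 ≠ [] then st.1 ++ [st.2] else st.1
      String.mk (PySem.Chars.join [' '] words)

-- ===== PORT B =====
-- `w[0].upper() + w[1:].lower()`; the comprehension filter guarantees w nonempty,
-- so the [] branch is unreachable (w[0] on "" would raise).
def capB_recase (w : List Char) : List Char :=
  match w with
  | [] => []
  | c :: rest => PySem.Chars.upperChar c :: PySem.Chars.lower rest

def capitalize_words_alt (string : Option String) : String :=
  match string with
  | none => ""          -- `if not string: return ""`
  | some s =>
    if s = "" then ""
    else
      String.mk (PySem.Chars.join [' ']
        (((PySem.Chars.splitOn s.toList [' ']).filter (· ≠ [])).map capB_recase))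

-- ===== PRECONDITION & SPEC =====
def Spec_capitalize_words (string : Option String) (out : String) : Prop := out = capitalize_words_alt string
instance (string : Option String) (out : String) : Decidable (Spec_capitalize_words string out) := by unfold Spec_capitalize_words; infer_instance

-- ===== CLAIM (what is proved, stated in full; the proofs are below) =====
def Claim_equal_capitalize_words : Prop := ∀ (string : Option String), Dom_capitalize_words string → Spec_capitalize_words string (capitalize_words string)

-- ===== LEMMAS AND PROOFS =====

-- proof-side helpers: the current token and the remainder after it
def takeWord : List Char → List Char
  | [] => []
  | c :: cs => if c = ' ' then [] else c :: takeWord cs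

def dropWord : List Char → List Char
  | [] => []
  | c :: cs => if c = ' ' then c :: cs else dropWord cs

theorem dropWord_length_le (cs : List Char) : (dropWord cs).length ≤ cs.length := by
  induction cs with
  | nil => simp [dropWord]
  | cons c cs ih =>
    by_cases hc : c = ' '
    · simp [dropWord, hc]
    · simp only [dropWord, if_neg hc, List.length_cons]
      omega

-- the nonempty space-separated tokens of cs, recursively
def split' : List Char → List (List Char)
  | [] => []
  | c :: cs =>
    if c = ' ' then split' cs
    else (c :: takeWord cs) :: split' ((dropWord cs).tail)
termination_by cs => cs.length
decreasing_by
  · simp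
  · have h1 := dropWord_length_le cs
    have h2 : ((dropWord cs).tail).length = (dropWord cs).length - 1 := List.length_tail
    simp only [List.length_cons]
    omega

-- A's loop followed by the final flush
def finalWords (cs : List Char) (words : List (List Char)) (cw : List Char) : List (List Char) :=
  let st := cs.foldl capA_step (words, cw)
  if st.2 ≠ [] then st.1 ++ [st.2] else st.1

-- mid-word: the rest of the current token is lowered, then the loop resumes word-less
theorem finalWords_midword (cs : List Char) : ∀ (words : List (List Char)) (cw : List Char), cw ≠ [] →
    finalWords cs words cw =
    finalWords ((dropWord cs).tail)
      (words ++ [cw ++ (takeWord cs).map PySem.Chars.lowerChar]) [] := by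
  induction cs with
  | nil => intro words cw h; simp [finalWords, takeWord, dropWord, h]
  | cons c cs ih =>
    intro words cw h
    by_cases hc : c = ' '
    · subst hc
      have hstep : capA_step (words, cw) ' ' = (words ++ [cw], []) := by
        simp [capA_step, h]
      simp [finalWords, List.foldl_cons, hstep, takeWord, dropWord]
    · have hstep : capA_step (words, cw) c = (words, cw ++ [PySem.Chars.lowerChar c]) := by
        simp [capA_step, hc, h]
      have h1 : finalWords (c :: cs) words cw = finalWords cs words (cw ++ [PySem.Chars.lowerChar c]) := by
        simp [finalWords, List.foldl_cons, hstep]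
      rw [h1, ih _ _ (by simp)]
      simp [takeWord, dropWord, hc]

-- A's loop from the word-less state produces exactly the recased tokens
theorem finalWords_eq_aux (n : Nat) : ∀ (cs : List Char), cs.length ≤ n → ∀ (words : List (List Char)),
    finalWords cs words [] = words ++ (split' cs).map capB_recase := by
  induction n with
  | zero =>
    intro cs hn words
    have : cs = [] := List.eq_nil_of_length_eq_zero (by omega)
    subst this
    simp [finalWords, split']
  | succ n ih =>
    intro cs hn words
    cases cs with
    | nil => simp [finalWords, split']
    | cons c cs =>
      by_cases hc : c = ' '
      · subst hc
        have hstep : capA_step (words, []) ' ' = (words, []) := by simp [capA_step]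
        have h1 : finalWords (' ' :: cs) words [] = finalWords cs words [] := by
          simp [finalWords, List.foldl_cons, hstep]
        rw [h1, ih cs (by simp at hn; omega) words, split']
        simp
      · have hstep : capA_step (words, []) c = (words, [PySem.Chars.upperChar c]) := by
          simp [capA_step, hc]
        have h1 : finalWords (c :: cs) words [] = finalWords cs words [PySem.Chars.upperChar c] := by
          simp [finalWords, List.foldl_cons, hstep]
        have hlen : ((dropWord cs).tail).length ≤ n := by
          have h2 := dropWord_length_le cs
          have h3 : ((dropWord cs).tail).length = (dropWord cs).length - 1 := List.length_tail
          simp at hn; omega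
        rw [h1, finalWords_midword cs words [PySem.Chars.upperChar c] (by simp),
            ih _ hlen, split']
        simp [hc, capB_recase, PySem.Chars.lower]

theorem finalWords_eq (cs : List Char) (words : List (List Char)) :
    finalWords cs words [] = words ++ (split' cs).map capB_recase :=
  finalWords_eq_aux cs.length cs le_rfl words

-- Python's "sep".split result, accumulated left-to-right
def mySplit (pre : List Char) : List Char → List (List Char)
  | [] => [pre]
  | c :: cs => if c = ' ' then pre :: mySplit [] cs else mySplit (pre ++ [c]) cs

theorem splitOn_go_spec (fuel : Nat) : ∀ (l cur : List Char) (acc : List (List Char)),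
    l.length < fuel →
    PySem.Chars.splitOn.go [' '] fuel l cur acc = acc.reverse ++ mySplit cur.reverse l := by
  induction fuel with
  | zero => intro l cur acc h; omega
  | succ fuel ih =>
    intro l cur acc h
    cases l with
    | nil => simp [PySem.Chars.splitOn.go, mySplit]
    | cons c rest =>
      by_cases hc : c = ' '
      · subst hc
        have hpre : List.isPrefixOf [' '] (' ' :: rest) = true := by
          simp [List.isPrefixOf]
        simp only [PySem.Chars.splitOn.go, hpre, if_pos, List.length_cons, List.length_nil,
          Nat.zero_add, List.drop_succ_cons, List.drop_zero]
        rw [ih rest [] (cur.reverse :: acc) (by simp at h ⊢; omega)]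
        simp [mySplit]
      · have hpre : List.isPrefixOf [' '] (c :: rest) = false := by
          simp [List.isPrefixOf]; exact fun h' => hc h'.symm
        simp only [PySem.Chars.splitOn.go, hpre, Bool.false_eq_true, if_false]
        rw [ih rest (c :: cur) acc (by simp at h ⊢; omega)]
        simp [mySplit, hc]

theorem splitOn_eq_mySplit (cs : List Char) :
    PySem.Chars.splitOn cs [' '] = mySplit [] cs := by
  unfold PySem.Chars.splitOn
  rw [splitOn_go_spec (cs.length + 1) cs [] [] (by omega)]
  simp

theorem mySplit_filter (cs : List Char) : ∀ (pre : List Char),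
    (mySplit pre cs).filter (· ≠ []) =
    if pre = [] then split' cs
    else (pre ++ takeWord cs) :: split' ((dropWord cs).tail) := by
  induction cs with
  | nil =>
    intro pre
    by_cases hp : pre = [] <;>
      simp [mySplit, split', takeWord, dropWord, hp, List.filter]
  | cons c cs ih =>
    intro pre
    by_cases hc : c = ' '
    · subst hc
      have h1 : mySplit pre (' ' :: cs) = pre :: mySplit [] cs := by simp [mySplit]
      rw [h1]
      by_cases hp : pre = []
      · rw [hp, List.filter_cons, if_neg (by simp), ih []]
        simp [split']
      · rw [List.filter_cons, if_pos (by simp [hp]), ih []]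
        simp [hp, split', takeWord, dropWord]
    · have h1 : mySplit pre (c :: cs) = mySplit (pre ++ [c]) cs := by simp [mySplit, hc]
      rw [h1, ih]
      by_cases hp : pre = []
      · simp [hp, split', takeWord, dropWord, hc]
      · simp [hp, takeWord, dropWord, hc]

theorem tokens_eq_split' (cs : List Char) :
    (PySem.Chars.splitOn cs [' ']).filter (· ≠ []) = split' cs := by
  rw [splitOn_eq_mySplit, mySplit_filter]
  simp

-- ===== VERDICT (by name: the statement is the Claim_ definition above) =====
theorem capitalize_words_spec : Claim_equal_capitalize_words := by
  intro string _
  unfold Spec_capitalize_words capitalize_words capitalize_words_alt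
  match string with
  | none => rfl
  | some s =>
    by_cases hs : s = ""
    · simp [hs]
    · simp only [hs, ite_false]
      rw [tokens_eq_split']
      have := finalWords_eq s.toList []
      simp only [finalWords, List.nil_append] at this
      rw [← this]
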